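-- pv_equiv track=rewrite | github.com/adane04/Machine-learning-and-Gait-Analysis- | gait_api.py | split_dict_equally
-- ===== SOURCE A (Python) =====
-- def split_dict_equally(input_dict, chunks=6):
--     "Splits dict by keys. Returns a list of dictionaries."
--     # prep with empty dicts
--     return_list = [dict() for idx in range(chunks)]
--     idx = 0
--     for k,v in input_dict.items():
--         return_list[idx][k] = v
--         if idx < chunks-1:  # indexes start at 0
--             idx += 1
--         else:
--             idx = 0
--     return return_list
-- ===== SOURCE B (Python) =====
-- def split_dict_equally(input_dict, chunks=6):
--     "Splits dict by keys. Returns a list of dictionaries."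
--     items = list(input_dict.items())
--     return [dict(items[i::chunks]) for i in range(chunks)]
-- ===== Notes on version B (the rewrite author's own statement) =====
-- stated objective: alternative
-- what changed: Replaces A's single stateful pass that cycles a round-robin index over a preallocated list of dicts with a chunk-major comprehension: chunk i is built directly as dict(items[i::chunks]) from a strided slice, so no mutable index and no in-place dict assignment remain.
import Mathlib
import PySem

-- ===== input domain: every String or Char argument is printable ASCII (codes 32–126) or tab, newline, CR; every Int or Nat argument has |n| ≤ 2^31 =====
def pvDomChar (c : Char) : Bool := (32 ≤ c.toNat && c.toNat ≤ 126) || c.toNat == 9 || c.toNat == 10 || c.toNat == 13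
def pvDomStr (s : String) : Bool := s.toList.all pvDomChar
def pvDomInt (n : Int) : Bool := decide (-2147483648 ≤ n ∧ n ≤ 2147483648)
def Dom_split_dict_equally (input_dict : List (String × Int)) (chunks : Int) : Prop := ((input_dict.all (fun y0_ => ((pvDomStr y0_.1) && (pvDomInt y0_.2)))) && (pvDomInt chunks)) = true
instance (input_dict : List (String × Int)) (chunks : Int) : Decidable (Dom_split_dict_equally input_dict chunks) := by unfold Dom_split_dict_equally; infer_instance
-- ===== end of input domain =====

-- B replaces A's single stateful round-robin pass with a chunk-major comprehension over
-- strided slices (chunk i = dict(items[i::chunks])); alternative decomposition, same cost.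

-- ===== PORT A =====
-- the body of A's for-loop: return_list[idx][k] = v, then advance/reset idx
def pvAStep (chunks : Int) (s : List (PySem.Dict String Int) × Int)
    (kv : String × Int) : List (PySem.Dict String Int) × Int :=
  let ret := s.1
  let idx := s.2
  -- return_list[idx][k] = v  (Python raises IndexError when idx is out of range;
  -- those inputs are outside Pre_, the state is simply kept there)
  let ret' := if h : 0 ≤ idx ∧ idx.toNat < ret.length
    then ret.set idx.toNat ((ret[idx.toNat]'h.2).insert kv.1 kv.2)
    else ret
  (ret', if idx < chunks - 1 then idx + 1 else 0)

def split_dict_equally (input_dict : List (String × Int)) (chunks : Int) :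
    List (List (String × Int)) :=
  -- return_list = [dict() for idx in range(chunks)]
  let init : List (PySem.Dict String Int) :=
    (PySem.List.pyRange 0 chunks 1).map (fun _ => PySem.Dict.empty)
  let st := input_dict.foldl (pvAStep chunks) (init, 0)
  st.1.map (fun d => d.items)

-- ===== PORT B =====
def split_dict_equally_alt (input_dict : List (String × Int)) (chunks : Int) :
    List (List (String × Int)) :=
  let items := input_dict
  -- items[i::chunks] is PySem.List.slice?; some for every i drawn from range(chunks)
  -- (chunks ≠ 0 there), so the .getD [] default is never taken
  (PySem.List.pyRange 0 chunks 1).map (fun i =>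
    (PySem.Dict.ofList ((PySem.List.slice? items (some i) none chunks).getD [])).items)

-- ===== PRECONDITION & SPEC =====
-- Pre_ excludes exactly the inputs where A raises IndexError: chunks ≤ 0 with a
-- non-empty dict (return_list is empty but the loop assigns into it).
def Pre_split_dict_equally (input_dict : List (String × Int)) (chunks : Int) : Prop :=
  input_dict = [] ∨ 1 ≤ chunks
instance (input_dict : List (String × Int)) (chunks : Int) :
    Decidable (Pre_split_dict_equally input_dict chunks) := by
  unfold Pre_split_dict_equally; infer_instance

def pvWitness_split_dict_equally : (List (String × Int)) × Int :=
  ([("a", 1), ("b", 2), ("c", 3)], 2)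

def Spec_split_dict_equally (input_dict : List (String × Int)) (chunks : Int)
    (out : List (List (String × Int))) : Prop :=
  out = split_dict_equally_alt input_dict chunks
instance (input_dict : List (String × Int)) (chunks : Int) (out : List (List (String × Int))) :
    Decidable (Spec_split_dict_equally input_dict chunks out) := by
  unfold Spec_split_dict_equally; infer_instance

-- ===== CLAIM (what is proved, stated in full; the proofs are below) =====
def Claim_equal_split_dict_equally : Prop :=
  ∀ (input_dict : List (String × Int)) (chunks : Int),
    Dom_split_dict_equally input_dict chunks →
    Pre_split_dict_equally input_dict chunks →
    Spec_split_dict_equally input_dict chunks (split_dict_equally input_dict chunks)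

-- ===== LEMMAS AND PROOFS =====

-- inserting one key/value pair, as A's loop body and dict() both do
def pvIns (d : PySem.Dict String Int) (kv : String × Int) : PySem.Dict String Int :=
  d.insert kv.1 kv.2

def pvInsertAll (d : PySem.Dict String Int) (ys : List (String × Int)) :
    PySem.Dict String Int :=
  ys.foldl pvIns d

-- the elements of xs landing in chunk j, when the round-robin index currently reads r (mod n)
def pvPick (n j : Nat) (r : Nat) : List (String × Int) → List (String × Int)
  | [] => []
  | x :: xs =>
    if r = j then x :: pvPick n j ((r + 1) % n) xs else pvPick n j ((r + 1) % n) xs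

theorem pvInsertAll_empty (ys : List (String × Int)) :
    pvInsertAll PySem.Dict.empty ys = PySem.Dict.ofList ys := rfl

theorem pvAFold_getElem? (chunks : Int) (hc : 0 < chunks)
    (xs : List (String × Int)) :
    ∀ (L : List (PySem.Dict String Int)) (r : Nat),
    L.length = chunks.toNat → r < chunks.toNat → ∀ (j : Nat),
    ((xs.foldl (pvAStep chunks) (L, (r : Int))).1)[j]? =
      L[j]?.map (fun d => pvInsertAll d (pvPick chunks.toNat j r xs)) := by
  induction xs with
  | nil =>
    intro L r _ _ j
    simp [pvPick, pvInsertAll]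
  | cons x xs ih =>
    intro L r hL hr j
    have hrL : r < L.length := by omega
    have hstep : pvAStep chunks (L, (r : Int)) x =
        (L.set r ((L[r]'hrL).insert x.1 x.2),
          (((r + 1) % chunks.toNat : Nat) : Int)) := by
      simp only [pvAStep]
      have h : 0 ≤ (r : Int) ∧ (r : Int).toNat < L.length := by
        constructor; · exact Int.natCast_nonneg r
        · simpa using hrL
      rw [dif_pos h]
      simp only [Prod.mk.injEq, Int.toNat_natCast]
      refine ⟨trivial, ?_⟩
      by_cases hlt : (r : Int) < chunks - 1
      · rw [if_pos hlt]
        have he : (r + 1) % chunks.toNat = r + 1 := Nat.mod_eq_of_lt (by omega)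
        rw [he]; push_cast; ring
      · rw [if_neg hlt]
        have hre : r + 1 = chunks.toNat := by omega
        rw [hre, Nat.mod_self]; simp
    simp only [List.foldl_cons, hstep]
    rw [ih (L.set r ((L[r]'hrL).insert x.1 x.2)) ((r + 1) % chunks.toNat)
      (by simp [hL]) (Nat.mod_lt _ (by omega)) j]
    by_cases hjr : j = r
    · subst hjr
      rw [List.getElem?_set_self hrL, List.getElem?_eq_getElem hrL]
      simp only [Option.map_some]
      simp [pvPick, pvInsertAll, pvIns]
    · rw [List.getElem?_set_ne (Ne.symm hjr)]
      congr 1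
      funext d
      simp only [pvPick]
      rw [if_neg (Ne.symm hjr)]

-- items[i::n] for a positive step n, as a structural recursion: take, then skip n-1
def pvStride (n : Nat) : List (String × Int) → Nat → List (String × Int)
  | [], _ => []
  | x :: xs, 0 => x :: pvStride n xs (n - 1)
  | _ :: xs, i + 1 => pvStride n xs i

theorem pvStride_of_le (n : Nat) (xs : List (String × Int)) :
    ∀ i : Nat, xs.length ≤ i → pvStride n xs i = [] := by
  induction xs with
  | nil => intro i _; rfl
  | cons x t ih =>
    intro i hi
    match i, hi with
    | i + 1, hi => exact ih i (by simpa using hi)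

theorem pvStride_filterMap (n : Nat) (hn : 0 < n) (xs : List (String × Int)) :
    ∀ i : Nat,
    List.filterMap (fun k => xs[i + n * k]?) (List.range ((xs.length - i + n - 1) / n))
      = pvStride n xs i := by
  induction xs with
  | nil =>
    intro i
    rw [show (List.nil (α := String × Int)).length - i + n - 1 = n - 1 from by simp,
      Nat.div_eq_of_lt (by omega)]
    rfl
  | cons x t ih =>
    intro i
    match i with
    | 0 =>
      have hcnt : (x :: t).length - 0 + n - 1 = t.length + n := by
        simp only [List.length_cons]; omega
      rw [hcnt, Nat.add_div_right _ hn, List.range_succ_eq_map, List.filterMap_cons]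
      simp only [Nat.mul_zero, Nat.add_zero, List.getElem?_cons_zero, List.filterMap_map]
      have hfn : ((fun k => (x :: t)[0 + n * k]?) ∘ Nat.succ)
          = fun k => t[(n - 1) + n * k]? := by
        funext k
        have hidx : 0 + n * Nat.succ k = ((n - 1) + n * k) + 1 := by
          rw [Nat.mul_succ]; omega
        simp only [Function.comp, hidx, List.getElem?_cons_succ]
      rw [hfn]
      have hcnt' : t.length / n = (t.length - (n - 1) + n - 1) / n := by
        by_cases h : n - 1 ≤ t.length
        · congr 1; omega
        · rw [Nat.div_eq_of_lt (by omega), Nat.div_eq_of_lt (by omega)]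
      rw [hcnt', ih (n - 1)]
      rfl
    | i + 1 =>
      have hcnt : (x :: t).length - (i + 1) + n - 1 = t.length - i + n - 1 := by
        simp only [List.length_cons]; omega
      have hfn : (fun k => (x :: t)[(i + 1) + n * k]?) = fun k => t[i + n * k]? := by
        funext k
        have hidx : (i + 1) + n * k = (i + n * k) + 1 := by omega
        rw [hidx, List.getElem?_cons_succ]
      rw [hcnt, hfn, ih i]
      rfl

theorem pvSlice (chunks : Int) (hc : 0 < chunks) (xs : List (String × Int)) (i : Nat) :
    PySem.List.slice? xs (some ((i : Nat) : Int)) none chunks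
      = some (pvStride chunks.toNat xs i) := by
  obtain ⟨m, rfl⟩ : ∃ m : Nat, chunks = ((m : Nat) : Int) := ⟨chunks.toNat, by omega⟩
  have hm : 0 < m := by omega
  have hne : ((m : Nat) : Int) ≠ 0 := by omega
  have hneg : ¬ ((m : Nat) : Int) < 0 := by omega
  have hi0 : ¬ ((i : Nat) : Int) < 0 := by omega
  simp only [PySem.List.slice?, PySem.List.sliceIndices, if_neg hne, if_neg hneg,
    if_pos (by exact_mod_cast hm : (0 : Int) < ((m : Nat) : Int)), if_neg hi0,
    Int.toNat_natCast]
  by_cases hil : i ≤ xs.length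
  · have hmin : min ((i : Nat) : Int) ((xs.length : Nat) : Int) = ((i : Nat) : Int) := by
      omega
    rw [hmin]
    by_cases hlt : ((i : Nat) : Int) < ((xs.length : Nat) : Int)
    · rw [if_pos hlt]
      have hcnt : ((((xs.length : Nat) : Int) - ((i : Nat) : Int) + ((m : Nat) : Int) - 1)
            / ((m : Nat) : Int)).toNat = (xs.length - i + m - 1) / m := by
        rw [show ((xs.length : Nat) : Int) - ((i : Nat) : Int) + ((m : Nat) : Int) - 1
            = (((xs.length - i + m - 1 : Nat) : Nat) : Int) from by omega]
        rw [← Int.natCast_div, Int.toNat_natCast]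
      have hfn : (fun k : Nat => xs[(((i : Nat) : Int) + ((m : Nat) : Int) * ((k : Nat) : Int)).toNat]?)
          = fun k : Nat => xs[i + m * k]? := by
        funext k
        congr 1
      rw [hcnt, hfn, pvStride_filterMap m hm xs i]
    · rw [if_neg hlt]
      simp only [List.range_zero, List.filterMap_nil]
      rw [pvStride_of_le _ _ i (by omega)]
  · have hmin : min ((i : Nat) : Int) ((xs.length : Nat) : Int)
        = ((xs.length : Nat) : Int) := by omega
    rw [hmin, if_neg (by omega : ¬ ((xs.length : Nat) : Int) < ((xs.length : Nat) : Int))]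
    simp only [List.range_zero, List.filterMap_nil]
    rw [pvStride_of_le _ _ i (by omega)]

theorem pvPick_stride (n : Nat) (hn : 0 < n) :
    ∀ (xs : List (String × Int)) (j r : Nat), j < n → r < n →
    pvPick n j r xs = pvStride n xs ((j + n - r) % n) := by
  intro xs
  induction xs with
  | nil => intro j r _ _; rfl
  | cons x t ih =>
    intro j r hj hr
    by_cases hrj : r = j
    · subst hrj
      have hm : (r + n - r) % n = 0 := by
        rw [show r + n - r = n from by omega, Nat.mod_self]
      simp only [pvPick, hm, pvStride, if_true]
      congr 1
      rw [ih r ((r + 1) % n) hj (Nat.mod_lt _ hn)]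
      congr 1
      by_cases h1 : r + 1 < n
      · rw [Nat.mod_eq_of_lt h1, show r + n - (r + 1) = n - 1 from by omega,
          Nat.mod_eq_of_lt (by omega)]
      · rw [show r + 1 = n from by omega, Nat.mod_self, Nat.sub_zero,
          Nat.add_mod_right, Nat.mod_eq_of_lt hj]
        omega
    · have hm1 : 1 ≤ (j + n - r) % n := by
        by_cases hlt : j < r
        · rw [Nat.mod_eq_of_lt (by omega)]; omega
        · rw [show j + n - r = (j - r) + n from by omega, Nat.add_mod_right,
            Nat.mod_eq_of_lt (by omega)]
          omega
      have hms : (j + n - r) % n = ((j + n - (r + 1) % n) % n) + 1 := by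
        by_cases h1 : r + 1 < n
        · rw [Nat.mod_eq_of_lt h1]
          by_cases hlt : j < r
          · rw [Nat.mod_eq_of_lt (by omega), Nat.mod_eq_of_lt (by omega)]
            omega
          · rw [show j + n - r = (j - r) + n from by omega, Nat.add_mod_right,
              show j + n - (r + 1) = (j - (r + 1)) + n from by omega, Nat.add_mod_right,
              Nat.mod_eq_of_lt (by omega), Nat.mod_eq_of_lt (by omega)]
            omega
        · rw [show r + 1 = n from by omega, Nat.mod_self, Nat.sub_zero,
            Nat.add_mod_right, Nat.mod_eq_of_lt hj, Nat.mod_eq_of_lt (by omega)]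
          omega
      simp only [pvPick, if_neg hrj]
      rw [ih j ((r + 1) % n) hj (Nat.mod_lt _ hn), hms]
      rfl

theorem pvMain (input_dict : List (String × Int)) (chunks : Int) (hc : 0 < chunks) :
    split_dict_equally input_dict chunks = split_dict_equally_alt input_dict chunks := by
  unfold split_dict_equally split_dict_equally_alt
  simp only []
  set n := chunks.toNat with hn
  have hcn : ((n : Nat) : Int) = chunks := by omega
  apply List.ext_getElem?
  intro j
  rw [List.getElem?_map, List.getElem?_map]
  have hA := pvAFold_getElem? chunks hc input_dict
    ((PySem.List.pyRange 0 chunks 1).map (fun _ => PySem.Dict.empty)) 0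
    (by simp [PySem.List.length_pyRange_one]) (by omega) j
  rw [Nat.cast_zero] at hA
  rw [hA]
  rw [List.getElem?_map, PySem.List.getElem?_pyRange_one]
  by_cases hj : j < (chunks - 0).toNat
  · rw [if_pos hj]
    simp only [Option.map_some]
    congr 1
    have hz : ((0 : Int) + (j : Nat)) = ((j : Nat) : Int) := by ring
    rw [hz, pvSlice chunks hc input_dict j, Option.getD_some, pvInsertAll_empty]
    have hjn : j < n := by omega
    rw [pvPick_stride n (by omega) input_dict j 0 hjn (by omega)]
    rw [Nat.sub_zero, Nat.add_mod_right, Nat.mod_eq_of_lt hjn]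
  · rw [if_neg hj]
    simp

-- ===== VERDICT (by name: the statement is the Claim_ definition above) =====
theorem split_dict_equally_spec : Claim_equal_split_dict_equally := by
  intro input_dict chunks _ hpre
  unfold Spec_split_dict_equally
  by_cases hc : 0 < chunks
  · exact pvMain input_dict chunks hc
  · have hnil : input_dict = [] := by
      rcases hpre with h | h
      · exact h
      · omega
    subst hnil
    have hle : chunks ≤ (0 : Int) := by omega
    unfold split_dict_equally split_dict_equally_alt
    rw [PySem.List.pyRange_one_eq_nil hle]
    simp
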